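-- pv_equiv track=rewrite | github.com/mei28/deep_sort | exp/20220609/utils/visualize.py | get_masked_poses
-- ===== SOURCE A (Python) =====
-- def get_masked_poses(poses: list, target_frame_id: int) -> list:
--     ret: list = []
--     for pose in poses:
--         _frame_id = pose[0]
--         if _frame_id == target_frame_id:
--             ret.append(pose)
--         if _frame_id > target_frame_id:
--             break
--     return ret
-- ===== SOURCE B (Python) =====
-- def get_masked_poses(poses: list, target_frame_id: int) -> list:
--     # find the cut point: index of the first pose whose frame id exceeds the target
--     cut = len(poses)
--     for i, pose in enumerate(poses):
--         if pose[0] > target_frame_id: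
--             cut = i
--             break
--     # then keep the matching poses from the prefix in one comprehension
--     return [pose for pose in poses[:cut] if pose[0] == target_frame_id]
-- ===== Notes on version B (the rewrite author's own statement) =====
-- stated objective: alternative
-- what changed: B splits A's single accumulator loop with an early break into two phases: first locate the cut index (first frame id above the target), then build the result with a list comprehension over the prefix slice.
import Mathlib
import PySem

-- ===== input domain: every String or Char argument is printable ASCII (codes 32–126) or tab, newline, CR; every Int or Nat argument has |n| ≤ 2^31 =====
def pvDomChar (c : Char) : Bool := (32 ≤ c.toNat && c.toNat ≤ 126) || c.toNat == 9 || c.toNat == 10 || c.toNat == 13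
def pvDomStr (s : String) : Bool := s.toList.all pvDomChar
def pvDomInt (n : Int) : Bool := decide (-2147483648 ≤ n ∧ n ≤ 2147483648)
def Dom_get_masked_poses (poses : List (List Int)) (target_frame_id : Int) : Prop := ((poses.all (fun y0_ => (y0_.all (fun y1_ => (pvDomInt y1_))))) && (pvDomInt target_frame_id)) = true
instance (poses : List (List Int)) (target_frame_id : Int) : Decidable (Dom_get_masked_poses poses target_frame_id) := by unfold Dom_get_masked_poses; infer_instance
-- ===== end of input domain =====

-- B replaces A's single break-on-first-overshoot accumulator loop by two phases:
-- find the cut index of the first frame id above the target, then filter the prefix (objective: alternative).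


-- ===== PORT A =====
-- loop over poses, appending matches and breaking past the first frame id above the target;
-- pose[0] is pyGet? (none on the empty pose = IndexError, excluded by Pre_; getD 0 is never reached there)
def get_masked_poses (poses : List (List Int)) (target_frame_id : Int) : List (List Int) :=
  match poses with
  | [] => []
  | pose :: rest =>
    let _frame_id := (PySem.List.pyGet? pose 0).getD 0
    let hd := if _frame_id = target_frame_id then [pose] else []
    if _frame_id > target_frame_id then hd
    else hd ++ get_masked_poses rest target_frame_id

-- ===== PORT B =====
-- phase 1: the cut index (enumerate loop with break; len poses if no frame id exceeds the target)
def pvCutIndex (poses : List (List Int)) (target_frame_id : Int) : Nat :=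
  match poses with
  | [] => 0
  | pose :: rest =>
    if (PySem.List.pyGet? pose 0).getD 0 > target_frame_id then 0
    else pvCutIndex rest target_frame_id + 1

-- phase 2: comprehension over the prefix slice poses[:cut]
def get_masked_poses_alt (poses : List (List Int)) (target_frame_id : Int) : List (List Int) :=
  (poses.take (pvCutIndex poses target_frame_id)).filter
    (fun pose => decide ((PySem.List.pyGet? pose 0).getD 0 = target_frame_id))

-- ===== PRECONDITION & SPEC =====
-- Pre_ excludes exactly the inputs on which Python raises IndexError on pose[0]: an empty pose
-- that the loop reaches, i.e. one not preceded by a (nonempty) pose whose frame id exceeds the target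
def Pre_get_masked_poses (poses : List (List Int)) (target_frame_id : Int) : Prop :=
  ∀ i < poses.length, poses.getD i [] = [] →
    ∃ j < i, poses.getD j [] ≠ [] ∧ (poses.getD j []).headI > target_frame_id
instance (poses : List (List Int)) (target_frame_id : Int) : Decidable (Pre_get_masked_poses poses target_frame_id) := by unfold Pre_get_masked_poses; infer_instance
def pvWitness_get_masked_poses : List (List Int) × Int := ([[1, 5], [2, 7]], 2)

def Spec_get_masked_poses (poses : List (List Int)) (target_frame_id : Int) (out : List (List Int)) : Prop := out = get_masked_poses_alt poses target_frame_id
instance (poses : List (List Int)) (target_frame_id : Int) (out : List (List Int)) : Decidable (Spec_get_masked_poses poses target_frame_id out) := by unfold Spec_get_masked_poses; infer_instance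

-- ===== CLAIM (what is proved, stated in full; the proofs are below) =====
def Claim_equal_get_masked_poses : Prop := ∀ (poses : List (List Int)) (target_frame_id : Int), Dom_get_masked_poses poses target_frame_id → Pre_get_masked_poses poses target_frame_id → Spec_get_masked_poses poses target_frame_id (get_masked_poses poses target_frame_id)

-- ===== LEMMAS AND PROOFS =====
-- the two ports agree on every input (even without Pre_: both read pose[0] through getD 0)
theorem get_masked_poses_eq_alt (poses : List (List Int)) (t : Int) :
    get_masked_poses poses t = get_masked_poses_alt poses t := by
  induction poses with
  | nil => rfl
  | cons pose rest ih =>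
    simp only [get_masked_poses, get_masked_poses_alt, pvCutIndex]
    by_cases hgt : (PySem.List.pyGet? pose 0).getD 0 > t
    · have hne : ¬ (PySem.List.pyGet? pose 0).getD 0 = t := by omega
      simp [hgt, hne]
    · by_cases heq : (PySem.List.pyGet? pose 0).getD 0 = t <;>
        simp [hgt, heq, ih, get_masked_poses_alt]

-- ===== VERDICT (by name: the statement is the Claim_ definition above) =====
theorem get_masked_poses_spec : Claim_equal_get_masked_poses := by
  intro poses t _ _
  exact get_masked_poses_eq_alt poses t
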